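-- pv_equiv track=rewrite | github.com/AdrianIAandBIGDATA/TrabajosProgramacion | ejercicio2-1.py | digit_position
-- ===== SOURCE A (Python) =====
-- def digit_position(number, digit):
--     if number < 0:
--         number = abs(number)
--
--     position = 0
--     while number > 0:
--         digito = number % 10
--         if digito == digit:
--             return position
--         number //= 10
--         position += 1
--
--     return -1
-- ===== SOURCE B (Python) =====
-- def digit_position(number, digit):
--     for position, ch in enumerate(reversed(str(abs(number)))):
--         if int(ch) == digit:
--             return position
--     return -1
-- ===== Notes on version B (the rewrite author's own statement) =====
-- stated objective: idiomatic
-- what changed: B walks the characters of str(abs(number)) in reverse with enumerate instead of A's repeated %10 and //=10 arithmetic loop.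
-- outside the precondition, e.g. on digit_position(0, 0): A returns -1, B returns 0
import Mathlib
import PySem

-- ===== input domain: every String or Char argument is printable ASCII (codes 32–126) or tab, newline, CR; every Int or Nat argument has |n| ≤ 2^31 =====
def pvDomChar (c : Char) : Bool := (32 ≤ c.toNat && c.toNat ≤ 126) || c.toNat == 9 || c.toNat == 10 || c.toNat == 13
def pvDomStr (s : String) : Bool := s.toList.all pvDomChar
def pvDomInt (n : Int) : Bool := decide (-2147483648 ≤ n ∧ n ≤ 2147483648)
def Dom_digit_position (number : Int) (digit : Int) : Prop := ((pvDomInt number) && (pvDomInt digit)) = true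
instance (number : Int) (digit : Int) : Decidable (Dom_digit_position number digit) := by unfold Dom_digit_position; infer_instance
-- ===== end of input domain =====

-- B scans the decimal string str(abs(number)) from its last character instead of A's repeated %10 // 10 loop (objective: idiomatic; same cost).

-- ===== PORT A =====
-- termination helper for A's while loop (cited by decreasing_by)
theorem pv_floordiv_ten_toNat_lt (n : Int) (h : 0 < n) :
    (PySem.Int.floordiv n 10).toNat < n.toNat := by
  rw [PySem.Int.floordiv_eq_ediv_of_pos (by norm_num)]
  omega

-- A's while loop: n is the remaining number, position the running index
def digit_position.loop (n : Int) (digit : Int) (position : Int) : Int :=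
  if h : n > 0 then
    if PySem.Int.mod n 10 == digit then position
    else digit_position.loop (PySem.Int.floordiv n 10) digit (position + 1)
  else -1
termination_by n.toNat
decreasing_by exact pv_floordiv_ten_toNat_lt n h

def digit_position (number : Int) (digit : Int) : Int :=
  digit_position.loop (if number < 0 then |number| else number) digit 0

-- ===== PORT B =====
-- the for-loop with early return over enumerate(reversed(str(abs(number))));
-- int(ch) is ported as (ofChars? [ch]).getD 0 — exact here, every char of str(n) parses
def pvAltScan (digit : Int) : List (Int × Char) → Int
  | [] => -1
  | (position, ch) :: rest =>
    if (PySem.Int.ofChars? [ch]).getD 0 == digit then position else pvAltScan digit rest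

def digit_position_alt (number : Int) (digit : Int) : Int :=
  pvAltScan digit (PySem.List.enumerate (PySem.Int.toStr |number|).toList.reverse 0)

-- ===== PRECONDITION & SPEC =====
-- Pre_ excludes only (0, 0): there A's loop never runs and returns -1 ("0 has no digits")
-- while B reads str(0) = "0" and returns 0 — both readings of this corner are defensible.
def Pre_digit_position (number : Int) (digit : Int) : Prop := ¬ (number = 0 ∧ digit = 0)
instance (number : Int) (digit : Int) : Decidable (Pre_digit_position number digit) := by
  unfold Pre_digit_position; infer_instance

def pvWitness_digit_position : Int × Int := (125, 2)

def Spec_digit_position (number : Int) (digit : Int) (out : Int) : Prop := out = digit_position_alt number digit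
instance (number : Int) (digit : Int) (out : Int) : Decidable (Spec_digit_position number digit out) := by unfold Spec_digit_position; infer_instance

-- ===== CLAIM (what is proved, stated in full; the proofs are below) =====
def Claim_equal_digit_position : Prop := ∀ (number : Int) (digit : Int), Dom_digit_position number digit → Pre_digit_position number digit → Spec_digit_position number digit (digit_position number digit)

-- ===== LEMMAS AND PROOFS =====

-- decimal digit characters of n, most significant first (= Nat.toDigits 10 n, proved below)
def pvDigits (n : Nat) : List Char :=
  if _h : n < 10 then [Nat.digitChar n]
  else pvDigits (n / 10) ++ [Nat.digitChar (n % 10)]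
termination_by n
decreasing_by exact Nat.div_lt_self (by omega) (by norm_num)

theorem pv_tdc_succ (f n : Nat) (l : List Char) :
    Nat.toDigitsCore 10 (f + 1) n l =
      if n / 10 = 0 then (n % 10).digitChar :: l
      else Nat.toDigitsCore 10 f (n / 10) ((n % 10).digitChar :: l) := by
  rw [Nat.toDigitsCore]

theorem pv_tdc_eq_pvDigits (f : Nat) : ∀ (n : Nat) (l : List Char), n < 10 ^ (f + 1) →
    Nat.toDigitsCore 10 (f + 1) n l = pvDigits n ++ l := by
  induction f with
  | zero =>
    intro n l h
    rw [pv_tdc_succ, pvDigits]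
    have h10 : n < 10 := by simpa using h
    simp [Nat.div_eq_of_lt h10, h10, Nat.mod_eq_of_lt h10]
  | succ f ih =>
    intro n l h
    rw [pv_tdc_succ, pvDigits]
    by_cases h10 : n < 10
    · simp [Nat.div_eq_of_lt h10, h10, Nat.mod_eq_of_lt h10]
    · have hdiv : n / 10 ≠ 0 := by
        intro h0; exact h10 (by omega)
      have hlt : n / 10 < 10 ^ (f + 1) := by
        rw [Nat.div_lt_iff_lt_mul (by norm_num)]
        calc n < 10 ^ (f + 2) := h
          _ = 10 ^ (f + 1) * 10 := by ring
      simp only [hdiv, if_false, dif_neg h10]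
      rw [ih (n / 10) _ hlt, List.append_assoc]
      rfl

theorem pv_toDigits_eq_pvDigits (n : Nat) : Nat.toDigits 10 n = pvDigits n := by
  have h1 : n < 10 ^ n := Nat.lt_pow_self (by norm_num)
  have h2 : n < 10 ^ (n + 1) :=
    lt_of_lt_of_le h1 (Nat.pow_le_pow_right (by norm_num) (by omega))
  have := pv_tdc_eq_pvDigits n n [] h2
  simpa [Nat.toDigits] using this

theorem pv_ofChars_digitChar (d : Nat) (h : d < 10) :
    (PySem.Int.ofChars? [Nat.digitChar d]).getD 0 = (d : Int) := by
  interval_cases d <;> decide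

theorem pv_scan_eq (digit : Int) : ∀ (mn : Nat), 0 < mn → ∀ (pos : Int),
    digit_position.loop (mn : Int) digit pos =
      pvAltScan digit (PySem.List.enumerate (pvDigits mn).reverse pos) := by
  intro mn
  induction mn using Nat.strong_induction_on with
  | _ mn ih =>
    intro hpos pos
    have hmod : PySem.Int.mod (mn : Int) 10 = ((mn % 10 : Nat) : Int) := by
      exact_mod_cast PySem.Int.mod_natCast mn 10
    have hfd : PySem.Int.floordiv (mn : Int) 10 = ((mn / 10 : Nat) : Int) := by
      exact_mod_cast PySem.Int.floordiv_natCast mn 10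
    rw [digit_position.loop, dif_pos (by exact_mod_cast hpos), hmod, hfd]
    rw [pvDigits]
    by_cases h10 : mn < 10
    · have hm : mn % 10 = mn := Nat.mod_eq_of_lt h10
      simp only [dif_pos h10, List.reverse_singleton, PySem.List.enumerate_cons,
        PySem.List.enumerate_nil, pvAltScan, pv_ofChars_digitChar mn h10, hm]
      by_cases hd : ((mn : Nat) : Int) = digit
      · have ht : (((mn : Nat) : Int) == digit) = true := beq_iff_eq.mpr hd
        simp only [ht, if_true]
      · have hb : (((mn : Nat) : Int) == digit) = false := beq_eq_false_iff_ne.mpr hd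
        simp only [hb, Bool.false_eq_true, if_false]
        rw [Nat.div_eq_of_lt h10, digit_position.loop]
        norm_num
    · simp only [dif_neg h10, List.reverse_append, List.reverse_singleton,
        List.singleton_append, PySem.List.enumerate_cons, pvAltScan,
        pv_ofChars_digitChar (mn % 10) (Nat.mod_lt _ (by norm_num))]
      by_cases hd : ((mn % 10 : Nat) : Int) = digit
      · have ht : (((mn % 10 : Nat) : Int) == digit) = true := beq_iff_eq.mpr hd
        simp only [ht, if_true]
      · have hb : (((mn % 10 : Nat) : Int) == digit) = false := beq_eq_false_iff_ne.mpr hd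
        simp only [hb, Bool.false_eq_true, if_false]
        exact ih (mn / 10) (Nat.div_lt_self hpos (by norm_num)) (by omega) (pos + 1)

theorem pv_alt_digits (number digit : Int) :
    digit_position_alt number digit =
      pvAltScan digit (PySem.List.enumerate (pvDigits (number.natAbs)).reverse 0) := by
  unfold digit_position_alt
  rw [PySem.Int.toList_toStr]
  have h1 : PySem.Int.toChars |number| = pvDigits number.natAbs := by
    rw [PySem.Int.toChars, if_neg (not_lt.mpr (abs_nonneg number)), pv_toDigits_eq_pvDigits]
    congr 1
    rw [Int.abs_eq_natAbs, Int.toNat_natCast]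
  rw [h1]

-- ===== VERDICT (by name: the statement is the Claim_ definition above) =====
theorem digit_position_spec : Claim_equal_digit_position := by
  intro number digit _ hpre
  unfold Spec_digit_position
  rw [pv_alt_digits]
  by_cases h0 : number = 0
  · have hd : digit ≠ 0 := fun hd => hpre ⟨h0, hd⟩
    subst h0
    have hA : digit_position 0 digit = -1 := by
      unfold digit_position
      rw [digit_position.loop]
      norm_num
    have hpd : pvDigits (Int.natAbs 0) = ['0'] := by rw [pvDigits]; decide
    have hv : (PySem.Int.ofChars? ['0']).getD 0 = (0 : Int) := by decide
    have hb : (((0 : Int)) == digit) = false := by simp [Ne.symm hd]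
    rw [hA, hpd]
    simp [PySem.List.enumerate_cons, PySem.List.enumerate_nil, pvAltScan, hv, hb]
  · have hpos : 0 < number.natAbs := by omega
    have hstart : (if number < 0 then |number| else number) = ((number.natAbs : Nat) : Int) := by
      rw [Int.abs_eq_natAbs]
      by_cases hn : number < 0
      · rw [if_pos hn]
      · rw [if_neg hn]; omega
    unfold digit_position
    rw [hstart]
    exact pv_scan_eq digit number.natAbs hpos 0
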